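-- pv_equiv track=rewrite | github.com/Cybok06/TrueType_v2 | reports.py | _prioritize_products
-- ===== SOURCE A (Python) =====
-- def _prioritize_products(names):
--     """Ensure PMS first, AGO second, keep others after (alphabetically)."""
--     names = list(dict.fromkeys(names))  # de-dupe, keep order
--     out = []
--     for pick in ("PMS", "AGO"):
--         for n in list(names):
--             if (n or "").strip().upper() == pick:
--                 out.append(n)
--                 names.remove(n)
--                 break
--     out.extend(sorted(names, key=lambda x: (x or "").upper()))
--     return out or ["PMS", "AGO"]
-- ===== SOURCE B (Python) =====
-- def _prioritize_products(names):
--     """Ensure PMS first, AGO second, keep others after (alphabetically)."""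
--     if not names:
--         return ["PMS", "AGO"]
--     pms = ago = None
--     rest = []
--     for n in dict.fromkeys(names):  # one pass: dedupe + pick firsts + collect rest
--         t = (n or "").strip().upper()
--         if t == "PMS" and pms is None:
--             pms = n
--         elif t == "AGO" and ago is None:
--             ago = n
--         else:
--             rest.append(n)
--     rest.sort(key=lambda x: (x or "").upper())
--     return [x for x in (pms, ago) if x is not None] + rest
-- ===== Notes on version B (the rewrite author's own statement) =====
-- stated objective: simpler
-- what changed: A's two full rescans of the deduped list with list.remove mutation are fused into one pass with pms/ago slots and a rest accumulator, followed by the same sort; no rescanning or removal remains.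
-- outside the precondition, e.g. on _prioritize_products([None]): A returns [None], B returns [None]
import Mathlib
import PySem

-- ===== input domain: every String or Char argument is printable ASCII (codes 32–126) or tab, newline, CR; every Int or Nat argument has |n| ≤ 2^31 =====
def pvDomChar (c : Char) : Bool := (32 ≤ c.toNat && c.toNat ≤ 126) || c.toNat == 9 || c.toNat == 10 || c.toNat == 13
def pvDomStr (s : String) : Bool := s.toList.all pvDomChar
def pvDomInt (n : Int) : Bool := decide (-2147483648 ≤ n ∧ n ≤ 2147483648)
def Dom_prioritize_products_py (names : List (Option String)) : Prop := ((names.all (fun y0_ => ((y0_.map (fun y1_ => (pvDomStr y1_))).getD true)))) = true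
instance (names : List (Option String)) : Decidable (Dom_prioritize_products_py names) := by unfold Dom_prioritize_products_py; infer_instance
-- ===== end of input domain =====

-- B fuses A's two rescans-with-remove of the deduped list into one pass with pms/ago
-- slots and a rest accumulator (objective: simpler); the final sort is unchanged.

-- ===== PORT A =====
-- (n or "").strip().upper()
def pvKeyMatch (n : Option String) : String := PySem.Str.upper (PySem.Str.strip (n.getD ""))
-- (x or "").upper()
def pvKeySort (n : Option String) : String := PySem.Str.upper (n.getD "")

-- one iteration of A's outer loop: scan names for the first match of `pick`, append it, remove it
def pvPick (st : List String × List (Option String)) (pick : String) : List String × List (Option String) :=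
  match st.2.find? (fun n => pvKeyMatch n == pick) with
  | some n => (st.1 ++ [n.getD ""], st.2.erase n)
  | none => st

def prioritize_products_py (names : List (Option String)) : List String :=
  let d := PySem.List.dedup names
  let st := [("PMS" : String), "AGO"].foldl pvPick ([], d)
  let out := st.1 ++ (PySem.List.sorted st.2 pvKeySort).map (fun n => n.getD "")
  if out = [] then ["PMS", "AGO"] else out

-- ===== PORT B =====
-- one iteration of B's single pass: (pms slot, ago slot, rest accumulator)
def pvStep (st : Option (Option String) × Option (Option String) × List (Option String))
    (n : Option String) : Option (Option String) × Option (Option String) × List (Option String) :=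
  let t := pvKeyMatch n
  if t == "PMS" && st.1.isNone then (some n, st.2.1, st.2.2)
  else if t == "AGO" && st.2.1.isNone then (st.1, some n, st.2.2)
  else (st.1, st.2.1, st.2.2 ++ [n])

def prioritize_products_py_alt (names : List (Option String)) : List String :=
  if names = [] then ["PMS", "AGO"]
  else
    let st := (PySem.List.dedup names).foldl pvStep (none, none, [])
    let rest := PySem.List.sorted st.2.2 pvKeySort
    (([st.1, st.2.1].filterMap id) ++ rest).map (fun n => n.getD "")

-- ===== PRECONDITION & SPEC =====
-- Pre_ excludes lists containing None: there Python A returns a list still containing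
-- None, which is not a value of the declared return type list[str].
def Pre_prioritize_products_py (names : List (Option String)) : Prop :=
  ∀ n ∈ names, n.isSome = true
instance (names : List (Option String)) : Decidable (Pre_prioritize_products_py names) := by
  unfold Pre_prioritize_products_py; infer_instance
def pvWitness_prioritize_products_py : List (Option String) :=
  [some " pms ", some "Diesel", some "AGO", some "Diesel"]

def Spec_prioritize_products_py (names : List (Option String)) (out : List String) : Prop := out = prioritize_products_py_alt names
instance (names : List (Option String)) (out : List String) : Decidable (Spec_prioritize_products_py names out) := by unfold Spec_prioritize_products_py; infer_instance

-- ===== CLAIM (what is proved, stated in full; the proofs are below) =====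
def Claim_equal_prioritize_products_py : Prop := ∀ (names : List (Option String)), Dom_prioritize_products_py names → Pre_prioritize_products_py names → Spec_prioritize_products_py names (prioritize_products_py names)

-- ===== LEMMAS AND PROOFS =====

theorem pvWitness_ok :
    Dom_prioritize_products_py pvWitness_prioritize_products_py ∧
    Pre_prioritize_products_py pvWitness_prioritize_products_py := by
  constructor <;> decide

-- if f holds of x but not of y then y ≠ x for BEq
theorem pv_beq_false {α : Type} [BEq α] [LawfulBEq α] (f : α → Bool) {x y : α}
    (hx : f x = true) (hy : f y = false) : (y == x) = false := by
  cases h : y == x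
  · rfl
  · exact absurd hx (by rw [← eq_of_beq h, hy]; simp)

theorem pv_foldl_ss (d : List (Option String)) (m a : Option String)
    (r : List (Option String)) :
    d.foldl pvStep (some m, some a, r) = (some m, some a, r ++ d) := by
  induction d generalizing r with
  | nil => simp
  | cons hd tl ih => simp [pvStep, ih]

theorem pv_foldl_sn (d : List (Option String)) (m : Option String)
    (r : List (Option String)) :
    d.foldl pvStep (some m, none, r) =
      match d.find? (fun n => pvKeyMatch n == "AGO") with
      | some a => (some m, some a, r ++ d.erase a)
      | none => (some m, none, r ++ d) := by
  induction d generalizing r with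
  | nil => simp
  | cons hd tl ih =>
    by_cases hq : (pvKeyMatch hd == "AGO") = true
    · simp [pvStep, hq, List.find?_cons_of_pos, pv_foldl_ss, List.erase_cons_head]
    · rw [Bool.not_eq_true] at hq
      rw [List.foldl_cons, show pvStep (some m, none, r) hd = (some m, none, r ++ [hd]) by
        simp [pvStep, hq], ih, List.find?_cons_of_neg (by simp [hq])]
      cases ha : tl.find? (fun n => pvKeyMatch n == "AGO") with
      | none => simp
      | some a =>
        have : (hd == a) = false := pv_beq_false _ (List.find?_some ha) hq
        simp [this]

theorem pv_foldl_ns (d : List (Option String)) (a : Option String)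
    (r : List (Option String)) :
    d.foldl pvStep (none, some a, r) =
      match d.find? (fun n => pvKeyMatch n == "PMS") with
      | some m => (some m, some a, r ++ d.erase m)
      | none => (none, some a, r ++ d) := by
  induction d generalizing r with
  | nil => simp
  | cons hd tl ih =>
    by_cases hp : (pvKeyMatch hd == "PMS") = true
    · simp [pvStep, hp, List.find?_cons_of_pos, pv_foldl_ss, List.erase_cons_head]
    · rw [Bool.not_eq_true] at hp
      rw [List.foldl_cons, show pvStep (none, some a, r) hd = (none, some a, r ++ [hd]) by
        simp [pvStep, hp], ih, List.find?_cons_of_neg (by simp [hp])]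
      cases hm : tl.find? (fun n => pvKeyMatch n == "PMS") with
      | none => simp
      | some m =>
        have : (hd == m) = false := pv_beq_false _ (List.find?_some hm) hp
        simp [this]

theorem pv_foldl_nn (d : List (Option String)) (r : List (Option String)) :
    d.foldl pvStep (none, none, r) =
      match d.find? (fun n => pvKeyMatch n == "PMS") with
      | some m =>
        (match (d.erase m).find? (fun n => pvKeyMatch n == "AGO") with
         | some a => (some m, some a, r ++ (d.erase m).erase a)
         | none => (some m, none, r ++ d.erase m))
      | none =>
        (match d.find? (fun n => pvKeyMatch n == "AGO") with
         | some a => (none, some a, r ++ d.erase a)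
         | none => (none, none, r ++ d)) := by
  induction d generalizing r with
  | nil => simp
  | cons hd tl ih =>
    by_cases hp : (pvKeyMatch hd == "PMS") = true
    · simp [pvStep, hp, List.find?_cons_of_pos, pv_foldl_sn, List.erase_cons_head]
    · rw [Bool.not_eq_true] at hp
      by_cases hq : (pvKeyMatch hd == "AGO") = true
      · rw [List.foldl_cons, show pvStep (none, none, r) hd = (none, some hd, r) by
          simp [pvStep, hp, hq], pv_foldl_ns, List.find?_cons_of_neg (by simp [hp])]
        cases hm : tl.find? (fun n => pvKeyMatch n == "PMS") with
        | none => simp [List.find?_cons_of_pos, hq, List.erase_cons_head]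
        | some m =>
          have hne : (hd == m) = false := pv_beq_false _ (List.find?_some hm) hp
          simp [hne, List.find?_cons_of_pos, hq, List.erase_cons_head]
      · rw [Bool.not_eq_true] at hq
        rw [List.foldl_cons, show pvStep (none, none, r) hd = (none, none, r ++ [hd]) by
          simp [pvStep, hp, hq], ih, List.find?_cons_of_neg (by simp [hp])]
        cases hm : tl.find? (fun n => pvKeyMatch n == "PMS") with
        | none =>
          rw [List.find?_cons_of_neg (by simp [hq])]
          cases ha : tl.find? (fun n => pvKeyMatch n == "AGO") with
          | none => simp
          | some a =>
            have hne : (hd == a) = false := pv_beq_false _ (List.find?_some ha) hq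
            simp [hne]
        | some m =>
          have hnem : (hd == m) = false := pv_beq_false _ (List.find?_some hm) hp
          dsimp only
          rw [show (hd :: tl).erase m = hd :: tl.erase m by simp [hnem],
            List.find?_cons_of_neg (by simp [hq])]
          cases ha : (tl.erase m).find? (fun n => pvKeyMatch n == "AGO") with
          | none => simp
          | some a =>
            have hnea : (hd == a) = false := pv_beq_false _ (List.find?_some ha) hq
            simp [hnea]

theorem pv_ofList_ne_nil {names : List (Option String)} (h : names ≠ []) :
    PySem.Set.ofList names ≠ [] := by
  cases names with
  | nil => exact absurd rfl h
  | cons hd tl =>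
    intro hnil
    have : hd ∈ PySem.List.dedup (hd :: tl) := by
      rw [PySem.List.mem_dedup]; exact List.mem_cons_self
    rw [PySem.List.dedup_eq_ofList, hnil] at this
    exact absurd this (List.not_mem_nil)

theorem pv_sorted_ne_nil {d : List (Option String)} (h : d ≠ []) :
    PySem.List.sorted d pvKeySort ≠ [] := by
  intro he
  have hl := PySem.List.length_sorted d pvKeySort false
  rw [he] at hl
  exact h (List.length_eq_zero_iff.mp hl.symm)

-- ===== VERDICT (by name: the statement is the Claim_ definition above) =====
theorem prioritize_products_py_spec : Claim_equal_prioritize_products_py := by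
  intro names _ _
  unfold Spec_prioritize_products_py prioritize_products_py prioritize_products_py_alt
  by_cases hnil : names = []
  · subst hnil; decide
  · simp only [if_neg hnil, pv_foldl_nn, List.nil_append, PySem.List.dedup_eq_ofList]
    cases hm : (PySem.Set.ofList names).find? (fun n => pvKeyMatch n == "PMS") with
    | some m =>
      cases ha : ((PySem.Set.ofList names).erase m).find? (fun n => pvKeyMatch n == "AGO") with
      | some a => simp [pvPick, hm, ha]
      | none => simp [pvPick, hm, ha]
    | none =>
      cases ha : (PySem.Set.ofList names).find? (fun n => pvKeyMatch n == "AGO") with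
      | some a => simp [pvPick, hm, ha]
      | none =>
        have hs := pv_sorted_ne_nil (pv_ofList_ne_nil hnil)
        simp [pvPick, hm, ha, hs]
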